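-- pv_equiv track=rewrite | github.com/Afnan-Hafiz/Undergrad-Labworks | CSE220/LAB 5/Task 2.py | task2F_recursive
-- ===== SOURCE A (Python) =====
-- def task2F_recursive( arr ,idx = -1,new = 0,odd_new =1,sum =0):
--   if idx == len(arr)-1:
--     return odd_new-new
--   idx += 1
--   if arr[idx]%2 == 0:
--     new+=arr[idx]
--     sum = task2F_recursive(arr,idx,new,odd_new)
--   else:
--     odd_new*=arr[idx]
--     sum = task2F_recursive(arr,idx,new,odd_new)
--   return sum
-- ===== SOURCE B (Python) =====
-- def task2F_recursive(arr, idx=-1, new=0, odd_new=1, sum=0):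
--     # Iterative: one loop over the remaining indices; 'sum' is unused, as in the original.
--     for i in range(idx + 1, len(arr)):
--         x = arr[i]
--         if x % 2 == 0:
--             new += x
--         else:
--             odd_new *= x
--     return odd_new - new
-- ===== Notes on version B (the rewrite author's own statement) =====
-- stated objective: simpler
-- what changed: Replaced the one-element-per-call recursion (with threaded accumulator parameters) by a single iterative for-loop over range(idx+1, len(arr)) that accumulates the even-sum and odd-product and returns odd_new - new once.
import Mathlib
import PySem

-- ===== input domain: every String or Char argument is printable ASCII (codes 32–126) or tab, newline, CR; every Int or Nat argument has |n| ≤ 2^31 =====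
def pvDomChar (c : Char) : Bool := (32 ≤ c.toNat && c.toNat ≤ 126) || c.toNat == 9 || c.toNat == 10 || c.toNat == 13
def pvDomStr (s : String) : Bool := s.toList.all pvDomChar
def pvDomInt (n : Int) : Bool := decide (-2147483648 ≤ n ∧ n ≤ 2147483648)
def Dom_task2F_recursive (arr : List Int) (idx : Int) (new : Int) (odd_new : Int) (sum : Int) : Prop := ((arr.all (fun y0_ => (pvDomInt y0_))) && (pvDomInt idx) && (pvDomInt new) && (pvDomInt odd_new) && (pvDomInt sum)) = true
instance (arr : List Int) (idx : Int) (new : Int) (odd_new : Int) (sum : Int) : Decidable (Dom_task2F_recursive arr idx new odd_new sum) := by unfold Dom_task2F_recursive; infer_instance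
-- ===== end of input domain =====

-- B replaces A's one-step recursion by a single iterative fold over range(idx+1, len(arr)) (objective: simpler).


-- ===== PORT A =====
def task2F_recursive (arr : List Int) (idx : Int) (new : Int) (odd_new : Int) (sum : Int) : Int :=
  if idx = (arr.length : Int) - 1 then odd_new - new
  else
    match h : PySem.List.pyGet? arr (idx + 1) with
    | none => 0   -- IndexError in Python; outside Pre_
    | some x =>
      if PySem.Int.mod x 2 = 0 then
        task2F_recursive arr (idx + 1) (new + x) odd_new 0
      else
        task2F_recursive arr (idx + 1) new (odd_new * x) 0
termination_by ((arr.length : Int) - idx).toNat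
decreasing_by
  all_goals
    have hin : PySem.Raise.InRange arr.length (idx + 1) := by
      by_contra hc
      rw [← PySem.List.pyGet?_eq_none_iff] at hc
      rw [hc] at h; simp at h
    obtain ⟨h1, h2⟩ := hin
    omega

-- ===== PORT B =====
def task2F_recursive_alt (arr : List Int) (idx : Int) (new : Int) (odd_new : Int) (sum : Int) : Int :=
  let st := (PySem.List.pyRange (idx + 1) (PySem.List.len arr) 1).foldl
    (fun (acc : Int × Int) i =>
      let x := PySem.List.pyGetD arr i 0
      if PySem.Int.mod x 2 = 0 then (acc.1 + x, acc.2) else (acc.1, acc.2 * x))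
    (new, odd_new)
  st.2 - st.1

-- ===== PRECONDITION & SPEC =====
-- Pre_ excludes exactly the inputs where A raises IndexError: idx ≥ len(arr) (A indexes arr[idx+1]
-- with idx+1 > len-1) or idx < -len(arr)-1 (the first visited index idx+1 wraps below -len).
def Pre_task2F_recursive (arr : List Int) (idx : Int) (new : Int) (odd_new : Int) (sum : Int) : Prop :=
  -(arr.length : Int) - 1 ≤ idx ∧ idx ≤ (arr.length : Int) - 1
instance (arr : List Int) (idx : Int) (new : Int) (odd_new : Int) (sum : Int) : Decidable (Pre_task2F_recursive arr idx new odd_new sum) := by unfold Pre_task2F_recursive; infer_instance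
def pvWitness_task2F_recursive : List Int × Int × Int × Int × Int := ([3, 4, 5], -1, 0, 1, 0)

def Spec_task2F_recursive (arr : List Int) (idx : Int) (new : Int) (odd_new : Int) (sum : Int) (out : Int) : Prop := out = task2F_recursive_alt arr idx new odd_new sum
instance (arr : List Int) (idx : Int) (new : Int) (odd_new : Int) (sum : Int) (out : Int) : Decidable (Spec_task2F_recursive arr idx new odd_new sum out) := by unfold Spec_task2F_recursive; infer_instance

-- ===== CLAIM (what is proved, stated in full; the proofs are below) =====
def Claim_equal_task2F_recursive : Prop := ∀ (arr : List Int) (idx : Int) (new : Int) (odd_new : Int) (sum : Int), Dom_task2F_recursive arr idx new odd_new sum → Pre_task2F_recursive arr idx new odd_new sum → Spec_task2F_recursive arr idx new odd_new sum (task2F_recursive arr idx new odd_new sum)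
-- ===== LEMMAS AND PROOFS =====

-- B takes one step of its loop when the next index is in range.
lemma alt_step (arr : List Int) (idx new odd_new sum : Int) (h : idx + 1 < (arr.length : Int)) :
    task2F_recursive_alt arr idx new odd_new sum =
      (let x := PySem.List.pyGetD arr (idx + 1) 0
       if PySem.Int.mod x 2 = 0 then task2F_recursive_alt arr (idx + 1) (new + x) odd_new sum
       else task2F_recursive_alt arr (idx + 1) new (odd_new * x) sum) := by
  simp only [task2F_recursive_alt, PySem.List.len_eq]
  rw [PySem.List.pyRange_one_cons (by exact_mod_cast h)]
  simp only [List.foldl_cons]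
  split <;> rfl

-- A and B agree on Pre_.
lemma main_eq (arr : List Int) : ∀ (n : Nat) (idx new odd_new sum : Int),
    (((arr.length : Int) - 1) - idx).toNat = n →
    -(arr.length : Int) - 1 ≤ idx → idx ≤ (arr.length : Int) - 1 →
    task2F_recursive arr idx new odd_new sum = task2F_recursive_alt arr idx new odd_new sum := by
  intro n
  induction n with
  | zero =>
    intro idx new odd_new sum hn hlo hhi
    have hidx : idx = (arr.length : Int) - 1 := by omega
    rw [task2F_recursive, if_pos hidx]
    simp only [task2F_recursive_alt, PySem.List.len_eq]
    rw [PySem.List.pyRange_one_eq_nil (by omega)]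
    rfl
  | succ m ih =>
    intro idx new odd_new sum hn hlo hhi
    have hne : idx ≠ (arr.length : Int) - 1 := by omega
    have hin : PySem.Raise.InRange arr.length (idx + 1) := by
      constructor <;> omega
    have hsome : PySem.List.pyGet? arr (idx + 1) = some (PySem.List.pyGetD arr (idx + 1) 0) := by
      rcases hg : PySem.List.pyGet? arr (idx + 1) with _ | x
      · exact absurd ((PySem.List.pyGet?_eq_none_iff arr (idx + 1)).mp hg) (not_not_intro hin)
      · simp [PySem.List.pyGetD, hg]
    rw [task2F_recursive, if_neg hne, alt_step arr idx new odd_new sum (by omega)]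
    simp only []
    split
    · next hnone => rw [hnone] at hsome; simp at hsome
    · next x hx =>
      have hxe : x = PySem.List.pyGetD arr (idx + 1) 0 := by
        rw [hx] at hsome; exact Option.some.inj hsome
      subst hxe
      split
      · exact (ih (idx + 1) (new + _) odd_new 0 (by omega) (by omega) (by omega)).trans rfl
      · exact (ih (idx + 1) new (odd_new * _) 0 (by omega) (by omega) (by omega)).trans rfl

-- ===== VERDICT (by name: the statement is the Claim_ definition above) =====
theorem task2F_recursive_spec : Claim_equal_task2F_recursive := by
  intro arr idx new odd_new sum _ hpre
  unfold Spec_task2F_recursive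
  exact main_eq arr _ idx new odd_new sum rfl hpre.1 hpre.2
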